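-- pv_equiv track=rewrite | github.com/db213/Solving-Equations-over-Free-Groups | constraint_solver/solver/equation.py | _find_var_placement
-- ===== SOURCE A (Python) =====
-- from collections import defaultdict
--
-- NEGATION = '*'
--
-- def _find_var_placement(equation):
--     var_placement = []
--     seen_vars = defaultdict(list)
--     no_vars_seen = 0
--     for i in range(0, len(equation)):
--         l = equation[i]
--         if l.islower() or l == NEGATION:
--             continue
--         negated = False
--         if i + 1 < len(equation):
--             negated = equation[i + 1] == NEGATION
--         if negated:
--             seen_vars[l].append(-1 * no_vars_seen)
--         else:
--             seen_vars[l].append(no_vars_seen)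
--         no_vars_seen += 1
--     for v in seen_vars.keys():
--         var_placement.append(seen_vars[v])
--     return var_placement
-- ===== SOURCE B (Python) =====
-- NEGATION = '*'
--
-- def _find_var_placement(equation):
--     # Staged pipeline instead of a dict-accumulating loop:
--     # pair each char with its successor (lookahead via zip), filter to the
--     # variables, enumerate to get signed positions, then group each distinct
--     # letter (first-seen order) by a per-letter scan. No dict at all.
--     follows = list(equation[1:]) + [' ']
--     pairs = [(c, f) for c, f in zip(equation, follows)
--              if not (c.islower() or c == NEGATION)]
--     occ = [(c, -i if f == NEGATION else i) for i, (c, f) in enumerate(pairs)]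
--     letters = []
--     for c, _ in occ:
--         if c not in letters:
--             letters.append(c)
--     return [[s for c, s in occ if c == L] for L in letters]
-- ===== Notes on version B (the rewrite author's own statement) =====
-- stated objective: alternative
-- what changed: B replaces A's dict-accumulating counter loop with lookahead indexing by a staged pipeline with no dict: zip the string with its shifted self for lookahead, filter to the variables, enumerate to assign signed positions, collect the distinct letters in first-seen order, and group by a per-letter scan over the occurrence list.
import Mathlib
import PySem

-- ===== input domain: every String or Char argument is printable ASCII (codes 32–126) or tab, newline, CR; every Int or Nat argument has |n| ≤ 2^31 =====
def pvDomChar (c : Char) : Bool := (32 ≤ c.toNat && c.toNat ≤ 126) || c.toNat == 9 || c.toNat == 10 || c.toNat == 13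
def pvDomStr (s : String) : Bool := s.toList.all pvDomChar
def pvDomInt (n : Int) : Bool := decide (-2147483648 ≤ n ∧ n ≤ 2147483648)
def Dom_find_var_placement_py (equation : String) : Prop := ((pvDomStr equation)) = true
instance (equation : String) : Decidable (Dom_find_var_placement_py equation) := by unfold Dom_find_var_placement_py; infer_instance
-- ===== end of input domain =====

-- B replaces A's dict-accumulating counter loop (lookahead by equation[i+1]) with a staged
-- dict-free pipeline: zip with the shifted string, filter, enumerate, dedup letters, per-letter
-- grouping scans; alternative decomposition, same results.

-- ===== PORT A =====
-- loop body of A's 'for i in range(0, len(equation))'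
def pvStepA (cs : List Char) (st : PySem.Dict Char (List Int) × Int) (i : Int) :
    PySem.Dict Char (List Int) × Int :=
  let seen := st.1
  let cnt := st.2
  let l := PySem.List.pyGetD cs i ' '   -- i ∈ range(len(cs)): always in bounds, default unused
  if PySem.Chars.islower l || l == '*' then st
  else
    let negated := if i + 1 < (cs.length : Int) then PySem.List.pyGetD cs (i + 1) ' ' == '*' else false
    if negated then (seen.modify l [] (fun xs => xs ++ [-1 * cnt]), cnt + 1)
    else (seen.modify l [] (fun xs => xs ++ [cnt]), cnt + 1)

def find_var_placement_py (equation : String) : List (List Int) :=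
  let cs := equation.toList
  let st := (PySem.List.pyRange 0 (cs.length : Int)).foldl (pvStepA cs) (PySem.Dict.empty, 0)
  -- 'for v in seen_vars.keys(): var_placement.append(seen_vars[v])'
  st.1.keys.map (fun v => st.1.getD v [])

-- ===== PORT B =====
def find_var_placement_py_alt (equation : String) : List (List Int) :=
  let cs := equation.toList
  -- follows = list(equation[1:]) + [' ']
  let follows := PySem.List.slice cs (some 1) none ++ [' ']
  -- pairs = [(c, f) for c, f in zip(equation, follows) if not (c.islower() or c == NEGATION)]
  let pairs := (cs.zip follows).filter (fun p => !(PySem.Chars.islower p.1 || p.1 == '*'))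
  -- occ = [(c, -i if f == NEGATION else i) for i, (c, f) in enumerate(pairs)]
  let occ := (PySem.List.enumerate pairs 0).map (fun q => (q.2.1, if q.2.2 == '*' then -q.1 else q.1))
  -- letters: first-seen distinct letters of occ
  let letters := occ.foldl (fun acc p => PySem.Set.add acc p.1) ([] : List Char)
  -- [[s for c, s in occ if c == L] for L in letters]
  letters.map (fun L => (occ.filter (fun p => p.1 == L)).map (fun p => p.2))

-- ===== PRECONDITION & SPEC =====
def Spec_find_var_placement_py (equation : String) (out : List (List Int)) : Prop := out = find_var_placement_py_alt equation
instance (equation : String) (out : List (List Int)) : Decidable (Spec_find_var_placement_py equation out) := by unfold Spec_find_var_placement_py; infer_instance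

-- ===== CLAIM (what is proved, stated in full; the proofs are below) =====
def Claim_equal_find_var_placement_py : Prop := ∀ (equation : String), Dom_find_var_placement_py equation → Spec_find_var_placement_py equation (find_var_placement_py equation)

-- ===== LEMMAS AND PROOFS =====

-- reference occurrence list: each variable paired with its signed running index,
-- the sign decided by the character that follows it
def pvOcc : List Char → Int → List (Char × Int)
  | [], _ => []
  | ch :: rest, c =>
    if PySem.Chars.islower ch || ch == '*' then pvOcc rest c
    else (ch, if rest.head? = some '*' then -c else c) :: pvOcc rest (c + 1)

-- reference recursion for A's dict after processing `rest` with counter `c`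
def pvSpecD : List Char → Int → PySem.Dict Char (List Int) → PySem.Dict Char (List Int)
  | [], _, d => d
  | ch :: rest, c, d =>
    if PySem.Chars.islower ch || ch == '*' then pvSpecD rest c d
    else
      pvSpecD rest (c + 1) (d.modify ch [] (fun xs => xs ++ [if rest.head? = some '*' then -c else c]))

theorem pvFoldA (rest : List Char) : ∀ (pre : List Char) (seen : PySem.Dict Char (List Int)) (cnt : Int),
    ((PySem.List.pyRange (pre.length : Int) (((pre ++ rest).length : Nat) : Int)).foldl
        (pvStepA (pre ++ rest)) (seen, cnt)).1 = pvSpecD rest cnt seen := by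
  induction rest with
  | nil =>
    intro pre seen cnt
    have h : PySem.List.pyRange ((pre.length : Nat) : Int) (((pre ++ ([] : List Char)).length : Nat) : Int) = [] := by
      simp [PySem.List.pyRange]
    rw [h]
    simp [pvSpecD]
  | cons ch rest ih =>
    intro pre seen cnt
    have hlt : ((pre.length : Nat) : Int) < (((pre ++ ch :: rest).length : Nat) : Int) := by
      simp
    rw [PySem.List.pyRange_one_cons hlt, List.foldl_cons]
    have hget : PySem.List.pyGetD (pre ++ ch :: rest) ((pre.length : Nat) : Int) ' ' = ch := by
      rw [PySem.List.pyGetD_natCast]; simp [List.getD]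
    have key : ∀ st : PySem.Dict Char (List Int) × Int,
        (List.foldl (pvStepA (pre ++ ch :: rest)) st
          (PySem.List.pyRange (((pre.length : Nat) : Int) + 1) (((pre ++ ch :: rest).length : Nat) : Int))).1
          = pvSpecD rest st.2 st.1 := by
      intro st
      have h1 := ih (pre ++ [ch]) st.1 st.2
      have e1 : pre ++ [ch] ++ rest = pre ++ ch :: rest := by simp
      have e2 : (((pre ++ [ch]).length : Nat) : Int) = ((pre.length : Nat) : Int) + 1 := by simp
      rw [e1, e2] at h1
      simpa using h1
    have hstep : pvStepA (pre ++ ch :: rest) (seen, cnt) ((pre.length : Nat) : Int) =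
        (if PySem.Chars.islower ch || ch == '*' then (seen, cnt)
         else if rest.head? = some '*' then
           (seen.modify ch [] (fun xs => xs ++ [-1 * cnt]), cnt + 1)
         else (seen.modify ch [] (fun xs => xs ++ [cnt]), cnt + 1)) := by
      rw [pvStepA]
      simp only [hget]
      by_cases hskip : (PySem.Chars.islower ch || ch == '*') = true
      · simp [hskip]
      · cases rest with
        | nil =>
          have hnl : ¬ ((pre.length : Nat) : Int) + 1 < (((pre ++ [ch]).length : Nat) : Int) := by
            simp
          simp [hskip]
        | cons c2 rest' =>
          have hl2 : ((pre.length : Nat) : Int) + 1 < (((pre ++ ch :: c2 :: rest').length : Nat) : Int) := by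
            simp
          have hget2 : PySem.List.pyGetD (pre ++ ch :: c2 :: rest') (((pre.length : Nat) : Int) + 1) ' ' = c2 := by
            have h : ((pre.length : Nat) : Int) + 1 = (((pre.length + 1 : Nat)) : Int) := by push_cast; ring
            rw [h, PySem.List.pyGetD_natCast]; simp [List.getD]
          simp only [hskip, hl2, if_true, hget2, if_false, Bool.false_eq_true]
          by_cases hc2 : c2 = '*' <;> simp [hc2]
    rw [hstep]
    by_cases hskip : (PySem.Chars.islower ch || ch == '*') = true
    · rw [if_pos hskip, key (seen, cnt)]
      rw [pvSpecD, if_pos hskip]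
    · rw [if_neg hskip]
      by_cases hh : rest.head? = some '*'
      · rw [if_pos hh, key _]
        rw [pvSpecD, if_neg hskip, if_pos hh]
        norm_num
      · rw [if_neg hh, key _]
        rw [pvSpecD, if_neg hskip, if_neg hh]

-- A's dict recursion is the grouping fold over the occurrence list
theorem pvSpecD_eq_foldl (rest : List Char) : ∀ (c : Int) (d : PySem.Dict Char (List Int)),
    pvSpecD rest c d = (pvOcc rest c).foldl (fun d p => d.modify p.1 [] (fun xs => xs ++ [p.2])) d := by
  induction rest with
  | nil => intro c d; simp [pvSpecD, pvOcc]
  | cons ch rest ih =>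
    intro c d
    rw [pvSpecD, pvOcc]
    by_cases hskip : (PySem.Chars.islower ch || ch == '*') = true
    · rw [if_pos hskip, if_pos hskip, ih]
    · rw [if_neg hskip, if_neg hskip, List.foldl_cons, ih]

-- B's zip/filter/enumerate pipeline computes the same occurrence list
theorem pvOccB (cs : List Char) : ∀ (s : Int),
    (PySem.List.enumerate ((cs.zip (cs.tail ++ [' '])).filter
        (fun p => !(PySem.Chars.islower p.1 || p.1 == '*'))) s).map
      (fun q => (q.2.1, if q.2.2 == '*' then -q.1 else q.1)) = pvOcc cs s := by
  induction cs with
  | nil => intro s; simp [pvOcc]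
  | cons ch rest ih =>
    intro s
    have hzip : (ch :: rest).zip ((ch :: rest).tail ++ [' ']) =
        (ch, rest.head?.getD ' ') :: rest.zip (rest.tail ++ [' ']) := by
      cases rest <;> simp [List.zip]
    rw [hzip]
    conv_rhs => rw [pvOcc]
    by_cases hskip : (PySem.Chars.islower ch || ch == '*') = true
    · rw [if_pos hskip, List.filter_cons_of_neg (by simp [hskip])]
      exact ih s
    · rw [if_neg hskip, List.filter_cons_of_pos (by simp [hskip]),
        PySem.List.enumerate_cons, List.map_cons, ih (s + 1)]
      have hsign : ((if rest.head?.getD ' ' = '*' then -s else s) : Int) =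
          if rest.head? = some '*' then -s else s := by
        cases rest with
        | nil => simp
        | cons c2 r2 => by_cases h : c2 = '*' <;> simp [h]
      simp [hsign]

-- B's letter loop is the ordered dedup of the occurrence letters
theorem pvLetters (occ : List (Char × Int)) :
    occ.foldl (fun acc p => PySem.Set.add acc p.1) ([] : List Char) =
      PySem.Set.ofList (occ.map Prod.fst) := by
  rw [PySem.Set.ofList_eq_foldl, List.foldl_map]

-- ===== VERDICT (by name: the statement is the Claim_ definition above) =====
theorem find_var_placement_py_spec : Claim_equal_find_var_placement_py := by
  intro equation _
  show find_var_placement_py equation = find_var_placement_py_alt equation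
  simp only [find_var_placement_py, find_var_placement_py_alt]
  have ha := pvFoldA equation.toList [] PySem.Dict.empty 0
  simp only [List.nil_append, List.length_nil, Nat.cast_zero] at ha
  rw [ha, pvSpecD_eq_foldl]
  rw [PySem.List.slice_from_one, pvOccB, pvLetters]
  rw [PySem.Dict.keys_foldl_modify_key (pvOcc equation.toList 0) Prod.fst ([] : List Int)
      (fun _ p => (fun xs => xs ++ [p.2])) (PySem.Dict.empty : PySem.Dict Char (List Int))]
  have hupd : PySem.Set.update (PySem.Dict.empty : PySem.Dict Char (List Int)).keys
        ((pvOcc equation.toList 0).map Prod.fst) =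
      PySem.Set.ofList ((pvOcc equation.toList 0).map Prod.fst) := by
    rw [PySem.Set.ofList_eq_foldl]; rfl
  rw [hupd]
  refine List.map_congr_left (fun k _ => ?_)
  rw [PySem.Dict.getD_foldl_modify_append]
  simp
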